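-- pv_equiv track=rewrite | github.com/talos141/Python_Exercises | 20_boleans.py | check
-- ===== SOURCE A (Python) =====
-- def check(num):
--     list_a = [1, 3, 5, 30, 42, 43, 500]
--
--     check_b = False
--
--     while check_b == False and len(list_a) != 1:
--         middle = (len(list_a) - 1) // 2
--
--         if num > list_a[middle]:
--             list_a = list_a[middle + 1::]
--
--         elif num < list_a[middle]:
--
--             list_a = list_a[0:middle]
--         else:
--             check_b = True
--
--     if check_b == True:
--         return (True)
--     else:
--         return (False)
-- ===== SOURCE B (Python) =====
-- def check(num):
--     return num in (1, 3, 5, 30, 42, 43, 500)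
-- ===== Notes on version B (the rewrite author's own statement) =====
-- stated objective: simpler
-- what changed: Replaced the hand-written slicing binary-search loop with a direct membership test on the fixed tuple of values.
-- intended difference: On num in {1, 5, 42, 500} A returns False although these values are in its list, because its loop stops when the slice length reaches 1 without testing that last element; B returns True, the intended membership answer. — e.g. on check(5): A returns false, B returns true
import Mathlib
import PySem

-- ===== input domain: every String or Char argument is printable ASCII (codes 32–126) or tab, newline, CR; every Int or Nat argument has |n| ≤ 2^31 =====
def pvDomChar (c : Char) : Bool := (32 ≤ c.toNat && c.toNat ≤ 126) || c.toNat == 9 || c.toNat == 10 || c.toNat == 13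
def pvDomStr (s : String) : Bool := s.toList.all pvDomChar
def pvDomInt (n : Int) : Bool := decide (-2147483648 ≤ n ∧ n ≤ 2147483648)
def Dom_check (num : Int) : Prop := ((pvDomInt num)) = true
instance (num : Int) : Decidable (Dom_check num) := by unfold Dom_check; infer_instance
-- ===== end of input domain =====

-- B replaces A's hand-written slicing binary-search loop by a direct membership test on the
-- fixed value tuple (objective: simpler); on {1, 5, 42, 500} A's loop misses the element and
-- B returns the intended True (see D_check).


-- ===== PORT A =====
-- the while loop of A: runs while check_b = false and len(list_a) ≠ 1; fuel only makes the
-- recursion total (each step strictly shrinks the list, starting from length 7, so fuel 8 is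
-- never exhausted on the actual call).
def checkLoop (num : Int) : Nat → List Int → Bool
  | 0, _ => false
  | fuel + 1, list_a =>
    if (list_a.length : Int) ≠ 1 then
      let middle : Int := PySem.Int.floordiv ((list_a.length : Int) - 1) 2
      match PySem.List.pyGet? list_a middle with
      | none => false   -- Python would raise IndexError here; unreachable from the start list
      | some m =>
        if num > m then
          checkLoop num fuel (PySem.List.slice list_a (some (middle + 1)) none)
        else if num < m then
          checkLoop num fuel (PySem.List.slice list_a (some 0) (some middle))
        else
          true          -- check_b := True, loop exits
    else false          -- loop exits with check_b still False

def check (num : Int) : Bool :=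
  -- list_a = [1, 3, 5, 30, 42, 43, 500]; check_b = False; while …; return check_b
  checkLoop num 8 [1, 3, 5, 30, 42, 43, 500]

-- ===== PORT B =====
def check_alt (num : Int) : Bool :=
  [(1 : Int), 3, 5, 30, 42, 43, 500].contains num

-- ===== PRECONDITION & SPEC =====
-- On num ∈ {1, 5, 42, 500} A returns False although these values are in its list (its loop
-- stops when the slice length reaches 1 without testing that last element); B returns True,
-- the intended membership answer.
def D_check (num : Int) : Prop := num = 1 ∨ num = 5 ∨ num = 42 ∨ num = 500
instance (num : Int) : Decidable (D_check num) := by unfold D_check; infer_instance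
def Spec_check (num : Int) (out : Bool) : Prop := ¬ D_check num → out = check_alt num
instance (num : Int) (out : Bool) : Decidable (Spec_check num out) := by unfold Spec_check; infer_instance
def pvDiffWitness_check : Int := 5
def pvDiffWitnessOut_check : Bool × Bool := (false, true)

-- ===== CLAIM (what is proved, stated in full; the proofs are below) =====
def Claim_unchanged_check : Prop := ∀ (num : Int), Dom_check num → Spec_check num (check num)
def Claim_changed_check : Prop := Dom_check (pvDiffWitness_check) ∧ D_check (pvDiffWitness_check) ∧ check (pvDiffWitness_check) = pvDiffWitnessOut_check.1 ∧ check_alt (pvDiffWitness_check) = pvDiffWitnessOut_check.2 ∧ pvDiffWitnessOut_check.1 ≠ pvDiffWitnessOut_check.2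
def Claim_exact_check : Prop := ∀ (num : Int), Dom_check num → D_check num → check num ≠ check_alt num

-- ===== LEMMAS AND PROOFS =====
-- the three concrete loop states the search visits, each one unfolding of checkLoop (closed
-- parts of the state reduce definitionally, so each step is rfl)
theorem checkLoop_step7 (num : Int) :
    checkLoop num 8 [1, 3, 5, 30, 42, 43, 500] =
      if num > 30 then checkLoop num 7 [42, 43, 500]
      else if num < 30 then checkLoop num 7 [1, 3, 5] else true := rfl

theorem checkLoop_hi (num : Int) :
    checkLoop num 7 [42, 43, 500] =
      if num > 43 then checkLoop num 6 [500]
      else if num < 43 then checkLoop num 6 [42] else true := rfl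

theorem checkLoop_lo (num : Int) :
    checkLoop num 7 [1, 3, 5] =
      if num > 3 then checkLoop num 6 [5]
      else if num < 3 then checkLoop num 6 [1] else true := rfl

theorem checkLoop_len_one (num : Int) (x : Int) : checkLoop num 6 [x] = false := rfl

theorem check_eval (num : Int) :
    check num = ((num == 3) || (num == 30) || (num == 43)) := by
  show checkLoop num 8 [1, 3, 5, 30, 42, 43, 500] = _
  rw [checkLoop_step7, checkLoop_hi, checkLoop_lo, checkLoop_len_one, checkLoop_len_one,
    checkLoop_len_one, checkLoop_len_one]
  split_ifs <;> simp <;> omega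

-- ===== VERDICT (by name: the statement is the Claim_ definition above) =====
theorem check_spec : Claim_unchanged_check := by
  intro num _ hD
  unfold D_check at hD
  push Not at hD
  obtain ⟨d1, d5, d42, d500⟩ := hD
  rw [check_eval]
  simp only [check_alt, List.contains_eq_mem, List.mem_cons, List.not_mem_nil]
  by_cases h3 : num = 3 <;> by_cases h30 : num = 30 <;> by_cases h43 : num = 43 <;>
    simp [h3, h30, h43, d1, d5, d42, d500]

theorem check_changed : Claim_changed_check := by unfold Claim_changed_check; decide

theorem check_tight : Claim_exact_check := by
  intro num _ hD
  unfold D_check at hD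
  rw [check_eval]
  rcases hD with h | h | h | h <;> subst h <;> decide
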